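-- pv_equiv track=rewrite | github.com/Ajinkya2222/Assignment1 | question5.py | DLS_util
-- ===== SOURCE A (Python) =====
-- def DLS_util(graph, node, goal, depth, visited):
--     if depth == 0 and node == goal:
--         return True
--     if depth > 0:
--         for neighbor in graph[node]:
--             if neighbor not in visited:
--                 visited.add(neighbor)
--                 if DLS_util(graph, neighbor, goal, depth - 1, visited):
--                     return True
--     return False
-- ===== SOURCE B (Python) =====
-- def DLS_util(graph, node, goal, depth, visited):
--     # Iterative depth-limited DFS with an explicit stack of (depth, iterator) frames.
--     if depth == 0 and node == goal:
--         return True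
--     if depth <= 0:
--         return False
--     stack = [(depth, iter(graph[node]))]
--     while stack:
--         d, it = stack[-1]
--         advanced = False
--         for neighbor in it:
--             if neighbor not in visited:
--                 visited.add(neighbor)
--                 if d - 1 == 0 and neighbor == goal:
--                     return True
--                 if d - 1 > 0:
--                     stack.append((d - 1, iter(graph[neighbor])))
--                 advanced = True
--                 break
--         if not advanced:
--             stack.pop()
--     return False
-- ===== Notes on version B (the rewrite author's own statement) =====
-- stated objective: alternative
-- what changed: The recursive depth-limited DFS is replaced by an iterative loop over an explicit stack of (depth, remaining-neighbors) frames that pushes on descent and pops on backtrack; same visit order and return value, no recursion.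
-- outside the precondition, e.g. on DLS_util({'a': ['b']}, 'a', 'b', 1, set()): A returns True, B returns True
import Mathlib
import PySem

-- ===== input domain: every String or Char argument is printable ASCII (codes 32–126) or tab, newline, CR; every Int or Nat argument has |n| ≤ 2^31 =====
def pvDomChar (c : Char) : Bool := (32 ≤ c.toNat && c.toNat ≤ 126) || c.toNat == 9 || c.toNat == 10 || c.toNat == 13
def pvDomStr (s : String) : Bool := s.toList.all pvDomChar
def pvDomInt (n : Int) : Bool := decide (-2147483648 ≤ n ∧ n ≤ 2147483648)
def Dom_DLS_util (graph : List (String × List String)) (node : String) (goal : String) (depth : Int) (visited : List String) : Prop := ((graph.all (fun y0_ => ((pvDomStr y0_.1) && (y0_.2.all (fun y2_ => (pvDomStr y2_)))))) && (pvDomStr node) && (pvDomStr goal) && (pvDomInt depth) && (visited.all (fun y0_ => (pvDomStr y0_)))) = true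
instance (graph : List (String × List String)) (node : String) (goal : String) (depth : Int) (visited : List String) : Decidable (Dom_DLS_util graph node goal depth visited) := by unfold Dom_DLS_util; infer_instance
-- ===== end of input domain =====

-- B replaces A's recursive depth-limited DFS by an iterative loop over an explicit stack of
-- (depth, remaining-neighbors) frames (objective: alternative decomposition, same cost).
-- A mutates `visited` in place; the equivalence proved here is about the RETURN value only
-- (B performs the same mutation in Python).

-- ===== PORT A =====
-- A's recursion, with the Python `visited` set threaded through as state.
-- `graph[node]` raises KeyError when `node` is not a key: such inputs are excluded by
-- Pre_DLS_util; `getD … []` stands in there.  The recursive call's depth `depth - 1` is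
-- carried as the Nat `k = depth.toNat - 1` (equal to depth - 1 whenever the loop runs, i.e.
-- 0 < depth).
mutual
def pvDlsA (graph : List (String × List String)) (goal : String) (node : String) (depth : Int) (visited : List String) : Bool × List String :=
  if depth == 0 && node == goal then (true, visited)
  else if h : (0:Int) < depth then
    pvLoopA graph goal (depth.toNat - 1) ((PySem.Dict.mk graph).getD node []) visited
  else (false, visited)
termination_by (depth.toNat, 1, 0)
decreasing_by apply Prod.Lex.left; omega

def pvLoopA (graph : List (String × List String)) (goal : String) (k : Nat) (ns : List String) (visited : List String) : Bool × List String :=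
  match ns with
  | [] => (false, visited)
  | n :: rest =>
    if PySem.Set.contains visited n then pvLoopA graph goal k rest visited
    else
      let v' := PySem.Set.add visited n
      let r := pvDlsA graph goal n (k : Int) v'
      if r.1 then (true, r.2) else pvLoopA graph goal k rest r.2
termination_by (k, 2, ns.length)
decreasing_by
  · apply Prod.Lex.right; apply Prod.Lex.right; simp
  · simp only [Int.toNat_natCast]; apply Prod.Lex.right; apply Prod.Lex.left; omega
  · apply Prod.Lex.right; apply Prod.Lex.right; simp
end

def DLS_util (graph : List (String × List String)) (node : String) (goal : String) (depth : Int) (visited : List String) : Bool :=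
  (pvDlsA graph goal node depth visited).1

-- ===== PORT B =====
-- Termination measure helpers for the stack loop (not part of B's computation).
def pvFrameStrs (stack : List (Nat × List String)) : Finset String :=
  stack.foldr (fun f s => f.2.toFinset ∪ s) ∅
def pvGraphStrs (graph : List (String × List String)) : Finset String :=
  graph.foldr (fun p s => p.2.toFinset ∪ s) ∅
def pvSumLens (stack : List (Nat × List String)) : Nat := stack.foldr (fun f s => f.2.length + s) 0

theorem pvGetD_subset_graphStrs (graph : List (String × List String)) (n : String) :
    ((PySem.Dict.mk graph).getD n []).toFinset ⊆ pvGraphStrs graph := by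
  induction graph with
  | nil => simp [PySem.Dict.getD, PySem.Dict.get?, pvGraphStrs]
  | cons p rest ih =>
    simp only [pvGraphStrs, List.foldr] at *
    by_cases h : p.1 == n
    · intro x hx
      have : (PySem.Dict.mk (p :: rest)).getD n [] = p.2 := by
        simp [PySem.Dict.getD, PySem.Dict.get?, h]
      rw [this] at hx
      exact Finset.mem_union_left _ hx
    · intro x hx
      have : (PySem.Dict.mk (p :: rest)).getD n [] = (PySem.Dict.mk rest).getD n [] := by
        simp [PySem.Dict.getD, PySem.Dict.get?, h]
      rw [this] at hx
      exact Finset.mem_union_right _ (ih hx)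

theorem pvCardStep (F' F : Finset String) (v : List String) (n : String)
    (hF : F' ⊆ F) (hn : n ∈ F) (hv : n ∉ v.toFinset) :
    (F' \ (v ++ [n]).toFinset).card < (F \ v.toFinset).card := by
  apply Finset.card_lt_card
  constructor
  · intro x hx
    simp only [Finset.mem_sdiff, List.toFinset_append] at hx ⊢
    exact ⟨hF hx.1, fun hxv => hx.2 (Finset.mem_union_left _ hxv)⟩
  · intro hsub
    have hmem : n ∈ F \ v.toFinset := Finset.mem_sdiff.mpr ⟨hn, hv⟩
    have := hsub hmem
    simp [List.toFinset_append] at this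

theorem pvLexOf {a a' b b' : Nat} (h1 : a' ≤ a) (h2 : b' < b) :
    Prod.Lex (· < ·) (· < ·) (a', b') (a, b) := by
  rcases lt_or_eq_of_le h1 with h | h
  · exact Prod.Lex.left _ _ h
  · subst h; exact Prod.Lex.right _ h2

-- B's while-loop: the stack holds (remaining depth d ≥ 1, remaining neighbors of the frame's
-- node); each step consumes the top frame's next neighbor, pushes on descent, pops when the
-- iterator is exhausted.  `graph[n]` raises KeyError when n is missing (excluded by Pre_).
def pvLoopB (graph : List (String × List String)) (goal : String) (stack : List (Nat × List String)) (visited : List String) : Bool :=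
  match stack with
  | [] => false
  | (d, ns) :: rest =>
    match ns with
    | [] => pvLoopB graph goal rest visited
    | n :: ns' =>
      if PySem.Set.contains visited n then pvLoopB graph goal ((d, ns') :: rest) visited
      else
        let v' := PySem.Set.add visited n
        if d == 1 && n == goal then true
        else if 2 ≤ d then
          pvLoopB graph goal ((d - 1, (PySem.Dict.mk graph).getD n []) :: (d, ns') :: rest) v'
        else pvLoopB graph goal ((d, ns') :: rest) v'
termination_by (((pvFrameStrs stack ∪ pvGraphStrs graph) \ visited.toFinset).card, pvSumLens stack + stack.length)
decreasing_by
  · -- pop an exhausted frame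
    apply pvLexOf
    · apply Finset.card_le_card
      apply Finset.sdiff_subset_sdiff _ (Finset.Subset.refl _)
      apply Finset.union_subset_union _ (Finset.Subset.refl _)
      simp [pvFrameStrs]
    · simp [pvSumLens]
  · -- skip an already-visited neighbor
    apply pvLexOf
    · apply Finset.card_le_card
      apply Finset.sdiff_subset_sdiff _ (Finset.Subset.refl _)
      apply Finset.union_subset_union _ (Finset.Subset.refl _)
      simp only [pvFrameStrs, List.foldr]
      apply Finset.union_subset_union _ (Finset.Subset.refl _)
      intro x hx; simp at hx ⊢; tauto
    · simp [pvSumLens]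
  · -- push a new frame after marking n visited
    rename_i hcont _ _
    have hadd : PySem.Set.add visited n = visited ++ [n] := by
      simp [PySem.Set.add]
      simpa using hcont
    rw [hadd]
    apply Prod.Lex.left
    apply pvCardStep _ ((pvFrameStrs ((d, n :: ns') :: rest)) ∪ pvGraphStrs graph)
    · simp only [pvFrameStrs, List.foldr]
      apply Finset.union_subset
      · apply Finset.union_subset
        · exact (pvGetD_subset_graphStrs graph n).trans Finset.subset_union_right
        · apply Finset.Subset.trans _ Finset.subset_union_left
          apply Finset.union_subset_union _ (Finset.Subset.refl _)
          intro x hx; simp at hx ⊢; tauto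
      · exact Finset.subset_union_right
    · apply Finset.mem_union_left
      simp [pvFrameStrs]
    · simpa using hcont
  · -- consume a neighbor at depth 1 (n ≠ goal) after marking it visited
    rename_i hcont _ _
    have hadd : PySem.Set.add visited n = visited ++ [n] := by
      simp [PySem.Set.add]
      simpa using hcont
    rw [hadd]
    apply Prod.Lex.left
    apply pvCardStep _ ((pvFrameStrs ((d, n :: ns') :: rest)) ∪ pvGraphStrs graph)
    · apply Finset.union_subset_union _ (Finset.Subset.refl _)
      simp only [pvFrameStrs, List.foldr]
      apply Finset.union_subset_union _ (Finset.Subset.refl _)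
      intro x hx; simp at hx ⊢; tauto
    · apply Finset.mem_union_left
      simp [pvFrameStrs]
    · simpa using hcont

def DLS_util_alt (graph : List (String × List String)) (node : String) (goal : String) (depth : Int) (visited : List String) : Bool :=
  if depth == 0 && node == goal then true
  else if depth ≤ 0 then false
  else pvLoopB graph goal [(depth.toNat, (PySem.Dict.mk graph).getD node [])] visited

-- ===== PRECONDITION & SPEC =====
-- Pre_ excludes depth > 0 inputs whose graph has a missing start node or a dangling neighbor
-- name: on those A's DFS raises KeyError whenever it reaches a missing key; the condition is
-- conservative, so it also excludes such inputs where the search happens to return before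
-- touching one (example in claim.json "cites").
def Pre_DLS_util (graph : List (String × List String)) (node : String) (goal : String) (depth : Int) (visited : List String) : Prop :=
  depth ≤ 0 ∨ ((PySem.Dict.mk graph).contains node = true ∧
    ∀ p ∈ graph, ∀ m ∈ p.2, (PySem.Dict.mk graph).contains m = true)
instance (graph : List (String × List String)) (node : String) (goal : String) (depth : Int) (visited : List String) : Decidable (Pre_DLS_util graph node goal depth visited) := by unfold Pre_DLS_util; infer_instance

def pvWitness_DLS_util : (List (String × List String)) × String × String × Int × List String :=
  ([("a", ["b"]), ("b", [])], "a", "b", 1, [])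

def Spec_DLS_util (graph : List (String × List String)) (node : String) (goal : String) (depth : Int) (visited : List String) (out : Bool) : Prop := out = DLS_util_alt graph node goal depth visited
instance (graph : List (String × List String)) (node : String) (goal : String) (depth : Int) (visited : List String) (out : Bool) : Decidable (Spec_DLS_util graph node goal depth visited out) := by unfold Spec_DLS_util; infer_instance

-- ===== CLAIM (what is proved, stated in full; the proofs are below) =====
def Claim_equal_DLS_util : Prop := ∀ (graph : List (String × List String)) (node : String) (goal : String) (depth : Int) (visited : List String), Dom_DLS_util graph node goal depth visited → Pre_DLS_util graph node goal depth visited → Spec_DLS_util graph node goal depth visited (DLS_util graph node goal depth visited)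

-- ===== LEMMAS AND PROOFS =====

theorem pvWitness_ok : Dom_DLS_util pvWitness_DLS_util.1 pvWitness_DLS_util.2.1 pvWitness_DLS_util.2.2.1 pvWitness_DLS_util.2.2.2.1 pvWitness_DLS_util.2.2.2.2 ∧ Pre_DLS_util pvWitness_DLS_util.1 pvWitness_DLS_util.2.1 pvWitness_DLS_util.2.2.1 pvWitness_DLS_util.2.2.2.1 pvWitness_DLS_util.2.2.2.2 := by
  decide

-- Running one frame of B's stack equals running A's neighbor loop on that frame, then
-- continuing with the rest of the stack and the visited set the loop left behind.
theorem pvBridge (graph : List (String × List String)) (goal : String) :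
    ∀ (k : Nat) (ns : List String) (rest : List (Nat × List String)) (visited : List String),
      pvLoopB graph goal ((k + 1, ns) :: rest) visited =
        (if (pvLoopA graph goal k ns visited).1 then true
         else pvLoopB graph goal rest (pvLoopA graph goal k ns visited).2) := by
  intro k
  induction k with
  | zero =>
    intro ns rest visited
    induction ns generalizing rest visited with
    | nil => simp [pvLoopB, pvLoopA]
    | cons n ns' ih =>
      by_cases hc : n ∈ visited
      · simp [pvLoopB, pvLoopA, hc, ih]
      · by_cases hg : n = goal
        · subst hg; simp [pvLoopB, pvLoopA, pvDlsA, hc]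
        · simp [pvLoopB, pvLoopA, pvDlsA, hc, hg, ih]
  | succ k ihk =>
    intro ns rest visited
    induction ns generalizing rest visited with
    | nil => simp [pvLoopB, pvLoopA]
    | cons n ns' ih =>
      by_cases hc : n ∈ visited
      · simp [pvLoopB, pvLoopA, hc, ih]
      · have h2 : 2 ≤ k + 1 + 1 := by omega
        have h3 : ¬((k : Int) + 1 = 0) := by omega
        by_cases hb : (pvLoopA graph goal k ((PySem.Dict.mk graph).getD n []) (visited ++ [n])).1 = true
        · simp [pvLoopB, pvLoopA, pvDlsA, hc, h2, h3, hb, ihk]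
        · simp [pvLoopB, pvLoopA, pvDlsA, hc, h2, h3, hb, ihk, ih]

-- ===== VERDICT (by name: the statement is the Claim_ definition above) =====
theorem DLS_util_spec : Claim_equal_DLS_util := by
  intro graph node goal depth visited hdom hpre
  unfold Spec_DLS_util DLS_util DLS_util_alt
  rw [pvDlsA]
  by_cases h0 : (depth == 0 && node == goal) = true
  · simp [h0]
  · by_cases hp : (0 : Int) < depth
    · have hle : ¬ depth ≤ 0 := by omega
      have hk : depth.toNat = (depth.toNat - 1) + 1 := by omega
      simp only [h0, if_false, hp, dif_pos, hle]
      conv_rhs => rw [hk]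
      rw [pvBridge]
      by_cases hb : (pvLoopA graph goal (depth.toNat - 1) ((PySem.Dict.mk graph).getD node []) visited).1 = true
      · simp [hb]
      · simp [hb, pvLoopB]
    · have hle : depth ≤ 0 := by omega
      simp [h0, hp, hle]
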